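-- pv_equiv track=rewrite | github.com/droessmj/aoc2021 | 12-7/solution.py | calc_distance_seed
-- ===== SOURCE A (Python) =====
-- lookup_deltas = {}
--
-- def calc_deltas(n):
--     if n not in lookup_deltas:
--         delta_val = sum(range(1,n+1))
--         lookup_deltas[n] = delta_val
--     return lookup_deltas[n]
--
-- def calc_distance_seed(seed, inputs, running_best):
--     total = 0
--     for i in inputs:
--         delta = calc_deltas(abs(seed-i))
--         total += delta
--
--         # bail early
--         if total > running_best:
--             return running_best
--
--     return total
-- ===== SOURCE B (Python) =====
-- def calc_distance_seed(seed, inputs, running_best):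
--     freq = {}
--     for i in inputs:
--         freq[i] = freq.get(i, 0) + 1
--
--     total = 0
--     for value, count in freq.items():
--         n = abs(seed - value)
--         total += (n * (n + 1) // 2) * count
--
--         # bail early
--         if total > running_best:
--             return running_best
--
--     return total
-- ===== Notes on version B (the rewrite author's own statement) =====
-- stated objective: alternative
-- what changed: B builds a frequency table of the positions and iterates over distinct values only, computing each triangular distance by the closed form n*(n+1)//2 instead of per-element memoized sum(range(1,n+1)); it trades A's immediate early bail for a full counting pass first.
import Mathlib
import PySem

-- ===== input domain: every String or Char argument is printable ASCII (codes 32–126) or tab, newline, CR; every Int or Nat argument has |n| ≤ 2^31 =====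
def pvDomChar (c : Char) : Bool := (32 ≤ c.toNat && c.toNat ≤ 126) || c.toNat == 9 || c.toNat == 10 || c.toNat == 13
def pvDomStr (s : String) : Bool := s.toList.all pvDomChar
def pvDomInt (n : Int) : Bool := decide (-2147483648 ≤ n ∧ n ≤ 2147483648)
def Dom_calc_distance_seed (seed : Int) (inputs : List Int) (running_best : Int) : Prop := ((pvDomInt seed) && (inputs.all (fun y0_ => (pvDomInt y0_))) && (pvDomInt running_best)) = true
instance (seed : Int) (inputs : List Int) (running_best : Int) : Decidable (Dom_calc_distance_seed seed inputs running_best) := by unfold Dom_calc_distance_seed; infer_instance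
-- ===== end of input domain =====

-- B replaces A's per-element memoized sum(range(1,n+1)) by a frequency table over distinct
-- values with the closed-form triangular number n*(n+1)//2 (alternative algorithm; return
-- value only — A also fills the module-level memo dict, a side effect B does not have).

-- ===== PORT A =====
-- calc_deltas: the module-level memo dict only caches the deterministic value
-- sum(range(1, n+1)); the port sums 1, 2, …, n in that order with a tail-recursive
-- accumulator (Python's range is lazy, so no list is materialized there either).
def pvSumUp : Nat → Int → Int → Int
  | 0, _, acc => acc
  | m + 1, i, acc => pvSumUp m (i + 1) (acc + i)

def calc_deltas (n : Int) : Int := pvSumUp (n.toNat) 1 0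

def pvALoop (seed running_best : Int) : Int → List Int → Int
  | total, [] => total
  | total, i :: rest =>
      let delta := calc_deltas (|seed - i|)
      let total' := total + delta
      if total' > running_best then running_best else pvALoop seed running_best total' rest

def calc_distance_seed (seed : Int) (inputs : List Int) (running_best : Int) : Int :=
  pvALoop seed running_best 0 inputs

-- ===== PORT B =====
def pvTri (n : Int) : Int := PySem.Int.floordiv (n * (n + 1)) 2

def pvBLoop (seed running_best : Int) : Int → List (Int × Int) → Int
  | total, [] => total
  | total, (value, count) :: rest =>
      let total' := total + pvTri (|seed - value|) * count
      if total' > running_best then running_best else pvBLoop seed running_best total' rest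

def calc_distance_seed_alt (seed : Int) (inputs : List Int) (running_best : Int) : Int :=
  let freq := inputs.foldl (fun d x => d.insert x (d.getD x 0 + 1)) PySem.Dict.empty
  pvBLoop seed running_best 0 freq.items

-- ===== PRECONDITION & SPEC =====
def Spec_calc_distance_seed (seed : Int) (inputs : List Int) (running_best : Int) (out : Int) : Prop := out = calc_distance_seed_alt seed inputs running_best
instance (seed : Int) (inputs : List Int) (running_best : Int) (out : Int) : Decidable (Spec_calc_distance_seed seed inputs running_best out) := by unfold Spec_calc_distance_seed; infer_instance

-- ===== CLAIM (what is proved, stated in full; the proofs are below) =====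
def Claim_equal_calc_distance_seed : Prop := ∀ (seed : Int) (inputs : List Int) (running_best : Int), Dom_calc_distance_seed seed inputs running_best → Spec_calc_distance_seed seed inputs running_best (calc_distance_seed seed inputs running_best)

-- ===== LEMMAS AND PROOFS =====

-- generic shape of both bail-early loops: fold a list of already-computed deltas
def pvGLoop (rb : Int) : Int → List Int → Int
  | total, [] => total
  | total, d :: rest =>
      if total + d > rb then rb else pvGLoop rb (total + d) rest

theorem pvALoop_eq_gLoop (seed rb total : Int) (xs : List Int) :
    pvALoop seed rb total xs = pvGLoop rb total (xs.map (fun i => calc_deltas (|seed - i|))) := by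
  induction xs generalizing total with
  | nil => rfl
  | cons i rest ih =>
      simp only [pvALoop, pvGLoop, List.map_cons]
      split_ifs <;> simp [ih]

theorem pvBLoop_eq_gLoop (seed rb total : Int) (ps : List (Int × Int)) :
    pvBLoop seed rb total ps = pvGLoop rb total (ps.map (fun p => pvTri (|seed - p.1|) * p.2)) := by
  induction ps generalizing total with
  | nil => rfl
  | cons p rest ih =>
      obtain ⟨v, c⟩ := p
      simp only [pvBLoop, pvGLoop, List.map_cons]
      split_ifs <;> simp [ih]

-- Gauss: 2 * (acc + i + (i+1) + … + (i+m-1))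
theorem pvSumUp_two_mul (m : Nat) : ∀ (i acc : Int),
    2 * pvSumUp m i acc = 2 * acc + (m : Int) * (2 * i + (m : Int) - 1) := by
  induction m with
  | zero => intro i acc; simp [pvSumUp]
  | succ k ih =>
      intro i acc
      rw [pvSumUp, ih (i + 1) (acc + i)]
      push_cast
      ring

theorem calc_deltas_eq_tri (n : Int) (hn : 0 ≤ n) : calc_deltas n = pvTri n := by
  obtain ⟨m, rfl⟩ := Int.eq_ofNat_of_zero_le hn
  have h2 := pvSumUp_two_mul m 1 0
  unfold calc_deltas pvTri
  rw [Int.toNat_natCast]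
  rw [(PySem.Int.floordiv_eq_iff_of_pos (by omega)).2]
  constructor <;> nlinarith [h2]

theorem tri_nonneg (n : Int) (hn : 0 ≤ n) : 0 ≤ pvTri n := by
  unfold pvTri
  rw [PySem.Int.floordiv_eq_ediv_of_pos (by omega)]
  exact Int.ediv_nonneg (by nlinarith) (by omega)

theorem gLoop_char (rb total : Int) (ds : List Int) (hnn : ∀ d ∈ ds, 0 ≤ d)
    (h0 : total ≤ rb) :
    pvGLoop rb total ds = if total + ds.sum > rb then rb else total + ds.sum := by
  induction ds generalizing total with
  | nil => simp [pvGLoop, not_lt.2 h0]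
  | cons d rest ih =>
      have hd : 0 ≤ d := hnn d (by simp)
      have hrest : ∀ x ∈ rest, 0 ≤ x := fun x hx => hnn x (by simp [hx])
      have hsum : 0 ≤ rest.sum := List.sum_nonneg hrest
      simp only [pvGLoop, List.sum_cons]
      by_cases h1 : total + d > rb
      · rw [if_pos h1, if_pos (by omega)]
      · rw [if_neg h1, ih (total + d) hrest (by omega),
            show total + (d + rest.sum) = total + d + rest.sum by ring]

theorem gLoop_neg (rb total : Int) (ds : List Int) (hne : ds ≠ [])
    (hnn : ∀ d ∈ ds, 0 ≤ d) (hrb : rb < total) :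
    pvGLoop rb total ds = rb := by
  cases ds with
  | nil => exact absurd rfl hne
  | cons d rest =>
      have hd : 0 ≤ d := hnn d (by simp)
      simp only [pvGLoop]
      rw [if_pos (by omega)]

theorem gLoop_ext (rb : Int) (dsA dsB : List Int)
    (hnnA : ∀ d ∈ dsA, 0 ≤ d) (hnnB : ∀ d ∈ dsB, 0 ≤ d)
    (hsum : dsA.sum = dsB.sum) (hemp : dsA = [] ↔ dsB = []) :
    pvGLoop rb 0 dsA = pvGLoop rb 0 dsB := by
  by_cases hrb : 0 ≤ rb
  · rw [gLoop_char rb 0 dsA hnnA hrb, gLoop_char rb 0 dsB hnnB hrb, hsum]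
  · cases hAe : dsA with
    | nil => rw [hemp.1 hAe]
    | cons d rest =>
        rw [← hAe,
            gLoop_neg rb 0 dsA (by rw [hAe]; simp) hnnA (by omega),
            gLoop_neg rb 0 dsB (fun h => by rw [hemp.2 h] at hAe; simp at hAe) hnnB (by omega)]

-- the weighted sum over distinct values equals the plain sum
theorem sum_counter_items (xs : List Int) (f : Int → Int) :
    (((PySem.Set.ofList xs).map (fun k => f k * xs.count k)).sum : Int)
      = (xs.map f).sum := by
  have hnd : (PySem.Set.ofList xs).Nodup := PySem.Set.nodup_ofList xs
  have htf : (PySem.Set.ofList xs).toFinset = xs.toFinset := by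
    ext a
    simp [List.mem_toFinset, PySem.Set.mem_ofList]
  calc ((PySem.Set.ofList xs).map (fun k => f k * xs.count k)).sum
      = ∑ m ∈ (PySem.Set.ofList xs).toFinset, f m * xs.count m :=
        (List.sum_toFinset _ hnd).symm
    _ = ∑ m ∈ xs.toFinset, xs.count m • f m := by
        rw [htf]; apply Finset.sum_congr rfl; intro m _
        simp only [nsmul_eq_mul]; ring
    _ = (xs.map f).sum := (Finset.sum_list_map_count xs f).symm

theorem counter_items_eq (xs : List Int) :
    (xs.foldl (fun d x => d.insert x (d.getD x 0 + 1)) PySem.Dict.empty).items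
      = (PySem.Set.ofList xs).map (fun k => (k, (xs.count k : Int))) := by
  rw [PySem.Dict.foldl_insert_getD_add_one_eq_counter, PySem.Dict.items_counter]

-- ===== VERDICT (by name: the statement is the Claim_ definition above) =====
theorem calc_distance_seed_spec : Claim_equal_calc_distance_seed := by
  intro seed inputs rb _
  unfold Spec_calc_distance_seed calc_distance_seed calc_distance_seed_alt
  rw [pvALoop_eq_gLoop, pvBLoop_eq_gLoop, counter_items_eq, List.map_map]
  simp only [Function.comp_def]
  apply gLoop_ext
  · intro d hd
    obtain ⟨i, _, rfl⟩ := List.mem_map.1 hd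
    rw [calc_deltas_eq_tri _ (abs_nonneg _)]
    exact tri_nonneg _ (abs_nonneg _)
  · intro d hd
    obtain ⟨k, _, rfl⟩ := List.mem_map.1 hd
    exact mul_nonneg (tri_nonneg _ (abs_nonneg _)) (by positivity)
  · rw [sum_counter_items inputs (fun k => pvTri (|seed - k|))]
    apply congrArg List.sum
    exact List.map_congr_left fun i _ => calc_deltas_eq_tri _ (abs_nonneg _)
  · simp only [List.map_eq_nil_iff]
    constructor
    · rintro rfl
      cases h : PySem.Set.ofList ([] : List Int) with
      | nil => rfl
      | cons a t =>
          have ha : a ∈ PySem.Set.ofList ([] : List Int) := by rw [h]; simp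
          rw [PySem.Set.mem_ofList] at ha
          simp at ha
    · intro h
      cases inputs with
      | nil => rfl
      | cons a t =>
          have ha : a ∈ PySem.Set.ofList (a :: t) := (PySem.Set.mem_ofList _ _).2 (by simp)
          rw [h] at ha
          simp at ha
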